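-- pv_equiv track=rewrite | github.com/dambrocioa/emotions_dashboard | src/interactive/pages/5_💬_Sparky_Words.py | get_formatted_corpus_as_txt
-- ===== SOURCE A (Python) =====
-- def get_formatted_corpus_as_txt(corpus):
--     # receives a list of dicts, each one with the following keys:
--     #| "user" | "date" "| short_date" | "week_info" | "original_message" | "cleaned_message"|
--     #
--     # returns a dict
--     #| "date": [string]
--     formatted_corpus = {}
--     for row in corpus:
--         date = row["short_date"]
--         if date not in formatted_corpus.keys():
--             formatted_corpus[date] = ''
--         formatted_corpus[date] = formatted_corpus[date] + row["cleaned_message"]+"\n"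
--     return formatted_corpus
-- ===== SOURCE B (Python) =====
-- def get_formatted_corpus_as_txt(corpus):
--     # Per-key brute force, in stages: extract the (date, message) pairs once,
--     # list the distinct dates in first-seen order, then for each date scan all
--     # pairs, filter the ones with that date and join them in a single pass.
--     pairs = [(row["short_date"], row["cleaned_message"]) for row in corpus]
--     dates = []
--     for d, _ in pairs:
--         if d not in dates:
--             dates.append(d)
--     return {d: "".join(m + "\n" for d2, m in pairs if d2 == d) for d in dates}
-- ===== Notes on version B (the rewrite author's own statement) =====
-- stated objective: alternative
-- what changed: A builds the result in one pass, accumulating each date's string inside a dict as it walks the rows; B works in stages with no accumulating dict at all: it extracts the (date, message) pairs, computes the distinct dates in first-seen order, and then for each date filters the pairs and joins the matching messages in one join per date.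
import Mathlib
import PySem

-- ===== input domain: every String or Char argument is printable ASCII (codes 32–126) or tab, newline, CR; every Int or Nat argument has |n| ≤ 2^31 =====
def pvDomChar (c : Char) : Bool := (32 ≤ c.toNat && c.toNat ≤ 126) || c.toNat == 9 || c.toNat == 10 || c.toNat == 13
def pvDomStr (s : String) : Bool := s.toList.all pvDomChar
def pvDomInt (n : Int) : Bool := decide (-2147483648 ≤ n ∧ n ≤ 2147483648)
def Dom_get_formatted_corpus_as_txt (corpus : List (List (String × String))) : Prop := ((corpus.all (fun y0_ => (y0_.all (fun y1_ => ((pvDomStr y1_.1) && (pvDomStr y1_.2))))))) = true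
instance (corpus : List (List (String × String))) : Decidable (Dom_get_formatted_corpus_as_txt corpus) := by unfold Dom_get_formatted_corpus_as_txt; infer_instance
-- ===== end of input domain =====

-- B replaces A's single-pass dict accumulation by staged per-key scans: extract the
-- (date, message) pairs, list the distinct dates, then filter and join once per date.

-- ===== PORT A =====
-- One dict; each row's cleaned message (plus "\n") is concatenated onto the entry of its date.
-- A missing "short_date"/"cleaned_message" key raises KeyError in Python (excluded by Pre_);
-- there the port leaves the loop state unchanged.
def pvStepA (fc : PySem.Dict String String) (row : List (String × String)) : PySem.Dict String String :=
  match (PySem.Dict.mk row).get? "short_date", (PySem.Dict.mk row).get? "cleaned_message" with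
  | some date, some msg =>
      let fc := if fc.contains date then fc else fc.insert date ""
      fc.insert date (fc.getD date "" ++ msg ++ "\n")
  | _, _ => fc

def get_formatted_corpus_as_txt (corpus : List (List (String × String))) : List (String × String) :=
  (corpus.foldl pvStepA PySem.Dict.empty).items

-- ===== PORT B =====
-- (date, message) pair of a row; none where Python's row["…"] raises KeyError (outside Pre_).
def pvRowDM (row : List (String × String)) : Option (String × String) :=
  match (PySem.Dict.mk row).get? "short_date", (PySem.Dict.mk row).get? "cleaned_message" with
  | some date, some msg => some (date, msg)
  | _, _ => none

def get_formatted_corpus_as_txt_alt (corpus : List (List (String × String))) : List (String × String) :=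
  let pairs := corpus.filterMap pvRowDM
  let dates := pairs.foldl (fun acc q => if acc.contains q.1 then acc else acc ++ [q.1]) []
  dates.map (fun d =>
    (d, PySem.Str.join "" ((pairs.filter (fun q => q.1 == d)).map (fun q => q.2 ++ "\n"))))

-- ===== PRECONDITION & SPEC =====
-- Pre_ excludes exactly the rows missing the "short_date" or "cleaned_message" key,
-- on which Python A raises KeyError (B raises there too).
def Pre_get_formatted_corpus_as_txt (corpus : List (List (String × String))) : Prop :=
  (corpus.all (fun row => (PySem.Dict.mk row).contains "short_date" && (PySem.Dict.mk row).contains "cleaned_message")) = true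
instance (corpus : List (List (String × String))) : Decidable (Pre_get_formatted_corpus_as_txt corpus) := by unfold Pre_get_formatted_corpus_as_txt; infer_instance

def pvWitness_get_formatted_corpus_as_txt : (List (List (String × String))) :=
  [[("short_date", "1/2"), ("cleaned_message", "hi there")],
   [("short_date", "1/3"), ("cleaned_message", "ok")],
   [("short_date", "1/2"), ("cleaned_message", "bye")]]

def Spec_get_formatted_corpus_as_txt (corpus : List (List (String × String))) (out : List (String × String)) : Prop := out = get_formatted_corpus_as_txt_alt corpus
instance (corpus : List (List (String × String))) (out : List (String × String)) : Decidable (Spec_get_formatted_corpus_as_txt corpus out) := by unfold Spec_get_formatted_corpus_as_txt; infer_instance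

-- ===== CLAIM (what is proved, stated in full; the proofs are below) =====
def Claim_equal_get_formatted_corpus_as_txt : Prop := ∀ (corpus : List (List (String × String))), Dom_get_formatted_corpus_as_txt corpus → Pre_get_formatted_corpus_as_txt corpus → Spec_get_formatted_corpus_as_txt corpus (get_formatted_corpus_as_txt corpus)

-- ===== LEMMAS AND PROOFS =====

-- the core dict step of A, phrased on an extracted (date, message) pair
def pvStep (fc : PySem.Dict String String) (q : String × String) : PySem.Dict String String :=
  let fc := if fc.contains q.1 then fc else fc.insert q.1 ""
  fc.insert q.1 (fc.getD q.1 "" ++ q.2 ++ "\n")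

lemma pvStepA_eq (fc : PySem.Dict String String) (row : List (String × String)) :
    pvStepA fc row = (pvRowDM row).elim fc (pvStep fc) := by
  unfold pvStepA pvRowDM pvStep
  cases (PySem.Dict.mk row).get? "short_date" <;>
    cases (PySem.Dict.mk row).get? "cleaned_message" <;> rfl

lemma pvFold_eq_pairs (corpus : List (List (String × String))) (fc : PySem.Dict String String) :
    corpus.foldl pvStepA fc = (corpus.filterMap pvRowDM).foldl pvStep fc := by
  induction corpus generalizing fc with
  | nil => rfl
  | cons row rest ih =>
    simp only [List.foldl_cons, List.filterMap_cons, pvStepA_eq]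
    cases pvRowDM row <;> simp [ih]

-- the distinct keys of `ps` that are not yet in `keys`, in first-seen order
def pvNewKeys (keys : List String) : List (String × String) → List String
  | [] => []
  | q :: ps => if keys.contains q.1 then pvNewKeys keys ps
               else q.1 :: pvNewKeys (keys ++ [q.1]) ps

lemma pvDedup_foldl (ps : List (String × String)) (acc : List String) :
    ps.foldl (fun acc q => if acc.contains q.1 then acc else acc ++ [q.1]) acc
      = acc ++ pvNewKeys acc ps := by
  induction ps generalizing acc with
  | nil => simp [pvNewKeys]
  | cons q ps ih =>
    simp only [List.foldl_cons, pvNewKeys]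
    by_cases h : acc.contains q.1
    · rw [if_pos h, if_pos h, ih]
    · rw [if_neg h, if_neg h, ih]
      simp

lemma pvNewKeys_not_mem {keys : List String} {ps : List (String × String)} {d : String}
    (h : d ∈ pvNewKeys keys ps) : keys.contains d = false := by
  induction ps generalizing keys with
  | nil => simp [pvNewKeys] at h
  | cons q ps ih =>
    simp only [pvNewKeys] at h
    by_cases hc : keys.contains q.1
    · rw [if_pos hc] at h; exact ih h
    · rw [if_neg hc] at h
      rcases List.mem_cons.mp h with rfl | h
      · simpa using hc
      · have := ih h
        simp only [List.contains_append, Bool.or_eq_false_iff] at this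
        exact this.1

-- the per-date concatenation B computes
def pvCat (ps : List (String × String)) (d : String) : String :=
  PySem.Str.join "" ((ps.filter (fun q => q.1 == d)).map (fun q => q.2 ++ "\n"))

-- ''.join over List Char, one element at the front
lemma pv_chars_join_cons (c : List Char) (cs : List (List Char)) :
    PySem.Chars.join [] (c :: cs) = c ++ PySem.Chars.join [] cs := by
  simp [PySem.Chars.join, List.intercalate]
  cases cs <;> simp [List.intersperse]

lemma pv_join_cons (a : String) (l : List String) :
    PySem.Str.join "" (a :: l) = a ++ PySem.Str.join "" l := by
  simp [PySem.Str.join, pv_chars_join_cons]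

lemma pvCat_cons_self (d m : String) (ps : List (String × String)) :
    pvCat ((d, m) :: ps) d = (m ++ "\n") ++ pvCat ps d := by
  simp [pvCat, pv_join_cons]

lemma pvCat_cons_ne (q : String × String) (ps : List (String × String)) (d : String)
    (h : ¬ q.1 = d) : pvCat (q :: ps) d = pvCat ps d := by
  simp [pvCat, h]

-- main loop invariant: A's dict after consuming `ps`, in terms of B's staged scans
lemma pv_inv (ps : List (String × String)) (fc : PySem.Dict String String)
    (hnd : fc.keys.Nodup) :
    (ps.foldl pvStep fc).items
      = fc.items.map (fun p => (p.1, p.2 ++ pvCat ps p.1))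
        ++ (pvNewKeys fc.keys ps).map (fun d => (d, pvCat ps d)) := by
  induction ps generalizing fc with
  | nil =>
    simp [pvNewKeys, pvCat, PySem.Str.join, PySem.Chars.join, List.intercalate]
  | cons q ps ih =>
    obtain ⟨d, m⟩ := q
    simp only [List.foldl_cons, pvNewKeys]
    by_cases hc : fc.contains d
    · -- key already present: in-place overwrite
      obtain ⟨v, hv⟩ : ∃ v, fc.get? d = some v := by
        have := PySem.Dict.contains_eq_isSome_get? (d := fc) (k := d)
        rw [hc] at this
        exact Option.isSome_iff_exists.mp this.symm
      have hgv : fc.getD d "" = v := PySem.Dict.getD_of_get?_eq_some fc "" hv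
      have hfc' : (fc.insert d (v ++ m ++ "\n")).keys = fc.keys :=
        PySem.Dict.keys_insert_of_contains fc _ hc
      have hstep : pvStep fc (d, m) = fc.insert d (v ++ m ++ "\n") := by
        simp [pvStep, hc, hgv]
      rw [hstep, ih _ (by rw [hfc']; exact hnd), hfc',
          PySem.Dict.items_insert_of_contains fc _ hc, List.map_map]
      rw [if_pos (by simpa [PySem.Dict.contains_eq_decide_mem_keys] using hc)]
      congr 1
      · apply List.map_congr_left
        intro p hp
        by_cases hpd : p.1 = d
        · have hmem : (d, p.2) ∈ fc.items := by rw [← hpd]; exact hp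
          have : fc.getD d "" = p.2 := PySem.Dict.getD_of_mem_items fc hmem hnd ""
          have hp2 : p.2 = v := by rw [hgv] at this; exact this.symm
          simp [Function.comp, hpd, hp2, pvCat_cons_self, String.append_assoc]
        · have := (pvCat_cons_ne (d, m) ps p.1 (fun h => hpd h.symm))
          simp [Function.comp, hpd, this]
      · apply List.map_congr_left
        intro d' hd'
        have hne : ¬ d = d' := by
          intro h; subst h
          have hnm := pvNewKeys_not_mem hd'
          rw [PySem.Dict.contains_eq_decide_mem_keys] at hc
          simp at hc hnm
          exact hnm hc
        rw [pvCat_cons_ne (d, m) ps d' hne]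
    · -- new key: fresh entry appended at the end
      have hstep : pvStep fc (d, m) = fc.insert d ("" ++ m ++ "\n") := by
        simp [pvStep, hc, PySem.Dict.getD_insert_self, PySem.Dict.insert_insert_self]
      have hk : (fc.insert d ("" ++ m ++ "\n")).keys = fc.keys ++ [d] :=
        PySem.Dict.keys_insert_of_not_contains fc _ (by simpa using hc)
      have hnd' : (fc.insert d ("" ++ m ++ "\n")).keys.Nodup :=
        PySem.Dict.nodup_keys_insert fc d _ hnd
      rw [hstep, ih _ hnd', hk,
          PySem.Dict.items_insert_of_not_contains fc _ (by simpa using hc)]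
      rw [if_neg (by simpa [PySem.Dict.contains_eq_decide_mem_keys] using hc)]
      simp only [List.map_append, List.map_cons, List.map_nil, List.append_assoc]
      congr 1
      · apply List.map_congr_left
        intro p hp
        have hpd : ¬ p.1 = d := by
          intro h
          have hm := PySem.Dict.mem_keys_of_mem_items fc hp
          rw [h] at hm
          rw [PySem.Dict.contains_eq_decide_mem_keys] at hc
          simp at hc
          exact hc hm
        rw [pvCat_cons_ne (d, m) ps p.1 (fun h => hpd h.symm)]
      · rw [List.singleton_append]
        congr 1
        · rw [pvCat_cons_self]
          simp [String.append_assoc]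
        · apply List.map_congr_left
          intro d' hd'
          have hne : ¬ d = d' := by
            intro h; subst h
            have hnm := pvNewKeys_not_mem hd'
            simp at hnm
          rw [pvCat_cons_ne (d, m) ps d' hne]

-- ===== VERDICT (by name: the statement is the Claim_ definition above) =====
theorem get_formatted_corpus_as_txt_spec : Claim_equal_get_formatted_corpus_as_txt := by
  intro corpus _ _
  unfold Spec_get_formatted_corpus_as_txt get_formatted_corpus_as_txt get_formatted_corpus_as_txt_alt
  rw [pvFold_eq_pairs, pv_inv _ _ PySem.Dict.nodup_keys_empty]
  simp only [pvDedup_foldl, List.nil_append]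
  simp [pvCat, PySem.Dict.empty]
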